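-- pv_equiv track=rewrite | github.com/RAVANv2/Algo_Plus_plus | Goldman Sachs/Rivision/Recursive_Starecase_Problem.py | find_with_dp
-- ===== SOURCE A (Python) =====
-- def find_with_dp(n):
--     dp = [0 for _ in range(n+1)]
--     dp[0] = 1
--     dp[1] = 1
--     dp[2] = 2
--
--     for i in range(3,n+1):
--         dp[i] = dp[i-1] + dp[i-2] + dp[i-3]
--
--     return dp[n]
-- ===== SOURCE B (Python) =====
-- def _mat_mul(A, B):
--     return tuple(tuple(sum(A[i][k] * B[k][j] for k in range(3)) for j in range(3))
--                  for i in range(3))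
--
--
-- def _mat_pow(M, e):
--     R = ((1, 0, 0), (0, 1, 0), (0, 0, 1))
--     while e > 0:
--         if e % 2 == 1:
--             R = _mat_mul(R, M)
--         M = _mat_mul(M, M)
--         e //= 2
--     return R
--
--
-- def find_with_dp(n):
--     if n < 2:
--         return 1
--     M = ((1, 1, 1), (1, 0, 0), (0, 1, 0))
--     R = _mat_pow(M, n - 2)
--     return 2 * R[0][0] + R[0][1] + R[0][2]
-- ===== Notes on version B (the rewrite author's own statement) =====
-- stated objective: faster
-- what changed: Replaces the O(n) DP array with binary matrix exponentiation of the 3-term recurrence, computing dp[n] as a first-row entry of the companion matrix raised to n-2.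
import Mathlib
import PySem

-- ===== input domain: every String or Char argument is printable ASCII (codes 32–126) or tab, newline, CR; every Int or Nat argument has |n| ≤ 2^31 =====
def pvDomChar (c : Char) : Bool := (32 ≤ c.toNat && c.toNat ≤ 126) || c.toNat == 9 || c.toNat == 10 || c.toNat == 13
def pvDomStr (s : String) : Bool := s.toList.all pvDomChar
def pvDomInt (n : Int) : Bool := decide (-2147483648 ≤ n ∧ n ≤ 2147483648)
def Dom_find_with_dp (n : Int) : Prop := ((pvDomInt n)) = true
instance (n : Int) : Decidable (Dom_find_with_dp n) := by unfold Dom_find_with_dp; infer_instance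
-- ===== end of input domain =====

-- B replaces the O(n) DP array with binary matrix exponentiation of the 3-term recurrence (objective: faster, asymptotic).

-- ===== PORT A =====
def find_with_dp (n : Int) : Int :=
  -- dp = [0 for _ in range(n+1)]
  let dp : List Int := (PySem.List.pyRange 0 (n + 1) 1).map (fun _ => 0)
  -- dp[0] = 1; dp[1] = 1; dp[2] = 2   (in range under Pre_, so pySetD/pyGetD are exact)
  let dp := PySem.List.pySetD dp 0 1
  let dp := PySem.List.pySetD dp 1 1
  let dp := PySem.List.pySetD dp 2 2
  -- for i in range(3, n+1): dp[i] = dp[i-1] + dp[i-2] + dp[i-3]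
  let dp := (PySem.List.pyRange 3 (n + 1) 1).foldl
    (fun dp i =>
      PySem.List.pySetD dp i
        (PySem.List.pyGetD dp (i - 1) 0 + PySem.List.pyGetD dp (i - 2) 0 +
          PySem.List.pyGetD dp (i - 3) 0))
    dp
  -- return dp[n]
  PySem.List.pyGetD dp n 0

-- ===== PORT B =====
-- 3x3 integer matrix as a triple of rows
abbrev PVMat : Type := (Int × Int × Int) × (Int × Int × Int) × (Int × Int × Int)

def pvMatMul (A B : PVMat) : PVMat :=
  ((A.1.1 * B.1.1 + A.1.2.1 * B.2.1.1 + A.1.2.2 * B.2.2.1,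
    A.1.1 * B.1.2.1 + A.1.2.1 * B.2.1.2.1 + A.1.2.2 * B.2.2.2.1,
    A.1.1 * B.1.2.2 + A.1.2.1 * B.2.1.2.2 + A.1.2.2 * B.2.2.2.2),
   (A.2.1.1 * B.1.1 + A.2.1.2.1 * B.2.1.1 + A.2.1.2.2 * B.2.2.1,
    A.2.1.1 * B.1.2.1 + A.2.1.2.1 * B.2.1.2.1 + A.2.1.2.2 * B.2.2.2.1,
    A.2.1.1 * B.1.2.2 + A.2.1.2.1 * B.2.1.2.2 + A.2.1.2.2 * B.2.2.2.2),
   (A.2.2.1 * B.1.1 + A.2.2.2.1 * B.2.1.1 + A.2.2.2.2 * B.2.2.1,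
    A.2.2.1 * B.1.2.1 + A.2.2.2.1 * B.2.1.2.1 + A.2.2.2.2 * B.2.2.2.1,
    A.2.2.1 * B.1.2.2 + A.2.2.2.1 * B.2.1.2.2 + A.2.2.2.2 * B.2.2.2.2))

def pvMatId : PVMat := ((1, 0, 0), (0, 1, 0), (0, 0, 1))

-- the while-loop of _mat_pow: R accumulator, M the repeatedly-squared base, e the Nat exponent
def pvMatPowLoop (R M : PVMat) (e : Nat) : PVMat :=
  if e = 0 then R
  else pvMatPowLoop (if e % 2 = 1 then pvMatMul R M else R) (pvMatMul M M) (e / 2)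

def find_with_dp_alt (n : Int) : Int :=
  if n < 2 then 1
  else
    let M : PVMat := ((1, 1, 1), (1, 0, 0), (0, 1, 0))
    let R := pvMatPowLoop pvMatId M (n - 2).toNat
    2 * R.1.1 + R.1.2.1 + R.1.2.2

-- ===== PRECONDITION & SPEC =====
-- Pre_: for n ≤ 1 the Python A raises IndexError (dp shorter than 3); exactly those inputs are excluded.
def Pre_find_with_dp (n : Int) : Prop := 2 ≤ n
instance (n : Int) : Decidable (Pre_find_with_dp n) := by unfold Pre_find_with_dp; infer_instance
def pvWitness_find_with_dp : Int := 5

def Spec_find_with_dp (n : Int) (out : Int) : Prop := out = find_with_dp_alt n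
instance (n : Int) (out : Int) : Decidable (Spec_find_with_dp n out) := by unfold Spec_find_with_dp; infer_instance

-- ===== CLAIM (what is proved, stated in full; the proofs are below) =====
def Claim_equal_find_with_dp : Prop := ∀ (n : Int), Dom_find_with_dp n → Pre_find_with_dp n → Spec_find_with_dp n (find_with_dp n)

-- ===== LEMMAS AND PROOFS =====

-- the tribonacci-style staircase count: 1, 1, 2, then sum of the previous three
def pvTrib : Nat → Int
  | 0 => 1
  | 1 => 1
  | 2 => 2
  | (k + 3) => pvTrib (k + 2) + pvTrib (k + 1) + pvTrib k

-- naive (left-multiplication) matrix power, proof-side reference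
def pvPowN (M : PVMat) : Nat → PVMat
  | 0 => pvMatId
  | (e + 1) => pvMatMul M (pvPowN M e)

theorem pvMatMul_assoc (A B C : PVMat) :
    pvMatMul (pvMatMul A B) C = pvMatMul A (pvMatMul B C) := by
  simp only [pvMatMul, Prod.mk.injEq]
  refine ⟨⟨by ring, by ring, by ring⟩, ⟨by ring, by ring, by ring⟩, by ring, by ring, by ring⟩

theorem pvMatMul_id_left (A : PVMat) : pvMatMul pvMatId A = A := by
  simp only [pvMatMul, pvMatId]
  refine Prod.ext ?_ (Prod.ext ?_ ?_) <;>
    refine Prod.ext (by ring) (Prod.ext (by ring) (by ring))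

theorem pvMatMul_id_right (A : PVMat) : pvMatMul A pvMatId = A := by
  simp only [pvMatMul, pvMatId]
  refine Prod.ext ?_ (Prod.ext ?_ ?_) <;>
    refine Prod.ext (by ring) (Prod.ext (by ring) (by ring))

theorem pvPowN_sq (M : PVMat) (k : Nat) :
    pvPowN (pvMatMul M M) k = pvPowN M (2 * k) := by
  induction k with
  | zero => rfl
  | succ j ih =>
    show pvMatMul (pvMatMul M M) (pvPowN (pvMatMul M M) j) = _
    rw [ih]
    have : 2 * (j + 1) = (2 * j + 1) + 1 := by ring
    rw [this]
    show _ = pvMatMul M (pvPowN M (2 * j + 1))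
    show _ = pvMatMul M (pvMatMul M (pvPowN M (2 * j)))
    rw [← pvMatMul_assoc]

theorem pvMatPowLoop_eq (e : Nat) : ∀ (R M : PVMat),
    pvMatPowLoop R M e = pvMatMul R (pvPowN M e) := by
  induction e using Nat.strong_induction_on with
  | _ e ih =>
    intro R M
    by_cases h0 : e = 0
    · subst h0; simp [pvMatPowLoop, pvPowN, pvMatMul_id_right]
    · rw [pvMatPowLoop, if_neg h0,
        ih (e / 2) (Nat.div_lt_self (Nat.pos_of_ne_zero h0) (by norm_num)), pvPowN_sq]
      by_cases hp : e % 2 = 1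
      · rw [if_pos hp]
        have he : 2 * (e / 2) + 1 = e := by omega
        rw [pvMatMul_assoc]
        congr 1
        calc pvMatMul M (pvPowN M (2 * (e / 2)))
            = pvPowN M (2 * (e / 2) + 1) := rfl
          _ = pvPowN M e := by rw [he]
      · rw [if_neg hp]
        have he : 2 * (e / 2) = e := by omega
        rw [he]

-- the vector (pvTrib (e+2), pvTrib (e+1), pvTrib e) read off the companion-matrix power
def pvMatVec (A : PVMat) (v : Int × Int × Int) : Int × Int × Int :=
  (A.1.1 * v.1 + A.1.2.1 * v.2.1 + A.1.2.2 * v.2.2,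
   A.2.1.1 * v.1 + A.2.1.2.1 * v.2.1 + A.2.1.2.2 * v.2.2,
   A.2.2.1 * v.1 + A.2.2.2.1 * v.2.1 + A.2.2.2.2 * v.2.2)

theorem pvMatVec_mul (A B : PVMat) (v : Int × Int × Int) :
    pvMatVec (pvMatMul A B) v = pvMatVec A (pvMatVec B v) := by
  simp only [pvMatVec, pvMatMul]
  refine Prod.ext (by ring) (Prod.ext (by ring) (by ring))

def pvCompanion : PVMat := ((1, 1, 1), (1, 0, 0), (0, 1, 0))

theorem pvMatVec_powN (e : Nat) :
    pvMatVec (pvPowN pvCompanion e) (2, 1, 1) = (pvTrib (e + 2), pvTrib (e + 1), pvTrib e) := by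
  induction e with
  | zero => simp [pvPowN, pvMatVec, pvMatId, pvTrib]
  | succ k ih =>
    show pvMatVec (pvMatMul pvCompanion (pvPowN pvCompanion k)) (2, 1, 1) = _
    rw [pvMatVec_mul, ih]
    simp only [pvMatVec, pvCompanion, pvTrib]
    refine Prod.ext (by ring) (Prod.ext (by ring) (by ring))

theorem alt_eq_trib (n : Int) (h : 2 ≤ n) : find_with_dp_alt n = pvTrib n.toNat := by
  have hn2 : ¬ n < 2 := by omega
  unfold find_with_dp_alt
  rw [if_neg hn2]
  have hR : pvMatPowLoop pvMatId pvCompanion (n - 2).toNat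
      = pvPowN pvCompanion (n - 2).toNat := by
    rw [pvMatPowLoop_eq, pvMatMul_id_left]
  have hv := pvMatVec_powN (n - 2).toNat
  have hnt : (n - 2).toNat + 2 = n.toNat := by omega
  rw [hnt] at hv
  show 2 * (pvMatPowLoop pvMatId pvCompanion (n - 2).toNat).1.1
      + (pvMatPowLoop pvMatId pvCompanion (n - 2).toNat).1.2.1
      + (pvMatPowLoop pvMatId pvCompanion (n - 2).toNat).1.2.2 = pvTrib n.toNat
  rw [hR]
  have h1 : (pvMatVec (pvPowN pvCompanion (n - 2).toNat) (2, 1, 1)).1 = pvTrib n.toNat := by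
    rw [hv]
  rw [← h1]
  simp only [pvMatVec]
  ring

-- ===== A-side: the DP loop computes pvTrib =====

-- one step of A's loop
def pvStep (dp : List Int) (i : Int) : List Int :=
  PySem.List.pySetD dp i
    (PySem.List.pyGetD dp (i - 1) 0 + PySem.List.pyGetD dp (i - 2) 0 +
      PySem.List.pyGetD dp (i - 3) 0)

theorem pvLoop_inv (n : Int) (hn : 2 ≤ n) (c : Nat) : ∀ (k : Int), 3 ≤ k → k ≤ n + 1 →
    (n + 1 - k).toNat = c →
    ∀ dp : List Int, dp.length = n.toNat + 1 →
    (∀ j : Nat, (j : Int) < k → dp.getD j 0 = pvTrib j) →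
    ((PySem.List.pyRange k (n + 1) 1).foldl pvStep dp).length = n.toNat + 1 ∧
    (∀ j : Nat, (j : Int) < n + 1 →
      ((PySem.List.pyRange k (n + 1) 1).foldl pvStep dp).getD j 0 = pvTrib j) := by
  induction c with
  | zero =>
    intro k h3 hk hc dp hlen hinv
    have hkn : k = n + 1 := by omega
    subst hkn
    rw [PySem.List.pyRange_one_eq_nil (le_refl _)]
    exact ⟨hlen, fun j hj => hinv j hj⟩
  | succ c ih =>
    intro k h3 hk hc dp hlen hinv
    have hklt : k < n + 1 := by omega
    rw [PySem.List.pyRange_one_cons hklt]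
    simp only [List.foldl_cons]
    -- in-range facts for the three reads and the write
    have hlenI : (dp.length : Int) = n.toNat + 1 := by rw [hlen]; push_cast; ring
    have hkN : k.toNat < dp.length := by omega
    have hread : ∀ m : Int, 0 ≤ m → m < k →
        PySem.List.pyGetD dp m 0 = pvTrib m.toNat := by
      intro m hm0 hmk
      rw [PySem.List.pyGetD_eq_getElem dp 0 hm0 (by exact_mod_cast (by omega : m < (dp.length : Int)))]
      rw [← List.getD_eq_getElem dp 0 (by omega), hinv m.toNat (by omega)]
    have hstep : pvStep dp k
        = dp.set k.toNat (pvTrib (k - 1).toNat + pvTrib (k - 2).toNat + pvTrib (k - 3).toNat) := by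
      unfold pvStep
      rw [hread (k - 1) (by omega) (by omega), hread (k - 2) (by omega) (by omega),
        hread (k - 3) (by omega) (by omega),
        PySem.List.pySetD_of_nonneg _ _ (by omega)]
    have htrib : pvTrib (k - 1).toNat + pvTrib (k - 2).toNat + pvTrib (k - 3).toNat
        = pvTrib k.toNat := by
      have h1 : (k - 1).toNat = (k - 3).toNat + 2 := by omega
      have h2 : (k - 2).toNat = (k - 3).toNat + 1 := by omega
      have h3' : k.toNat = (k - 3).toNat + 3 := by omega
      rw [h1, h2, h3']
      rfl
    rw [hstep, htrib]
    refine ih (k + 1) (by omega) (by omega) (by omega) _ (by simp [hlen]) ?_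
    intro j hj
    by_cases hjk : j = k.toNat
    · subst hjk
      rw [List.getD_eq_getElem _ _ (by simp [hlen]; omega), List.getElem_set_self]
    · have hjlt : (j : Int) < k := by omega
      rw [List.getD_eq_getElem?_getD, List.getElem?_set_ne (by omega)]
      rw [← List.getD_eq_getElem?_getD]
      exact hinv j hjlt

theorem a_eq_trib (n : Int) (h : 2 ≤ n) : find_with_dp n = pvTrib n.toNat := by
  unfold find_with_dp
  -- initial dp
  set dp0 : List Int := (PySem.List.pyRange 0 (n + 1) 1).map (fun _ => 0) with hdp0
  have hlen0 : dp0.length = n.toNat + 1 := by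
    simp [hdp0, PySem.List.length_pyRange_one]; omega
  set dp1 := PySem.List.pySetD (PySem.List.pySetD (PySem.List.pySetD dp0 0 1) 1 1) 2 2 with hdp1
  have hset : dp1 = ((dp0.set 0 1).set 1 1).set 2 2 := by
    rw [hdp1, PySem.List.pySetD_of_nonneg _ _ (by omega),
      PySem.List.pySetD_of_nonneg _ _ (by omega),
      PySem.List.pySetD_of_nonneg _ _ (by omega)]
    rfl
  have hlen1 : dp1.length = n.toNat + 1 := by simp [hset, hlen0]
  have hinit : ∀ j : Nat, (j : Int) < 3 → dp1.getD j 0 = pvTrib j := by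
    intro j hj
    have hj3 : j < 3 := by omega
    interval_cases j <;>
    · rw [hset, List.getD_eq_getElem _ _ (by simp [hlen0]; try omega)]
      simp [pvTrib]
  obtain ⟨hlenf, hfin⟩ := pvLoop_inv n h (n + 1 - 3).toNat 3 (le_refl _) (by omega) rfl dp1 hlen1 hinit
  have hfold : ((PySem.List.pyRange 3 (n + 1) 1).foldl
      (fun dp i => PySem.List.pySetD dp i
        (PySem.List.pyGetD dp (i - 1) 0 + PySem.List.pyGetD dp (i - 2) 0 +
          PySem.List.pyGetD dp (i - 3) 0)) dp1)
      = (PySem.List.pyRange 3 (n + 1) 1).foldl pvStep dp1 := rfl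
  show PySem.List.pyGetD ((PySem.List.pyRange 3 (n + 1) 1).foldl
      (fun dp i => PySem.List.pySetD dp i
        (PySem.List.pyGetD dp (i - 1) 0 + PySem.List.pyGetD dp (i - 2) 0 +
          PySem.List.pyGetD dp (i - 3) 0)) dp1) n 0 = pvTrib n.toNat
  rw [hfold]
  rw [PySem.List.pyGetD_eq_getElem _ 0 (by omega) (by rw [hlenf]; push_cast; omega)]
  rw [← List.getD_eq_getElem _ 0 (by omega)]
  have : ((n.toNat : Int)) = n := by omega
  rw [← this] at hfin ⊢
  exact hfin n.toNat (by omega)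

-- ===== VERDICT (by name: the statement is the Claim_ definition above) =====
theorem find_with_dp_spec : Claim_equal_find_with_dp := by
  intro n _ hpre
  unfold Spec_find_with_dp
  rw [a_eq_trib n hpre, alt_eq_trib n hpre]
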